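-- pv_equiv track=rewrite | github.com/sinc-lab/miRe2e | miRe2e/get_error.py | count_rep
-- ===== SOURCE A (Python) =====
-- def count_rep(res):
--     aux = 0
--     total_aux = 0
--     for j in range(len(res) - 1):
--         if res[j]:
--             aux += 1
--         else:
--             aux = 0
--         if aux >= 2 and not res[j + 1]: total_aux += (aux - 1)
--     return total_aux
-- ===== SOURCE B (Python) =====
-- def count_rep(res):
--     # Pass 1: compress res into maximal runs of equal truthiness [(bool, length), ...].
--     runs = []
--     for x in res:
--         b = bool(x)
--         if runs and runs[-1][0] == b:
--             runs[-1][1] += 1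
--         else:
--             runs.append([b, 1])
--     # Pass 2: every truthy run not at the very end contributes (length - 1).
--     total = 0
--     for b, n in runs[:-1]:
--         if b:
--             total += n - 1
--     return total
-- ===== Notes on version B (the rewrite author's own statement) =====
-- stated objective: alternative
-- what changed: Replaced A's single-pass incremental run counter (aux reset/penalty emitted per index pair) by a two-pass run-length compression: first compress the list into maximal runs of equal truthiness, then sum (length - 1) over every truthy run except the final run.
import Mathlib
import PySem

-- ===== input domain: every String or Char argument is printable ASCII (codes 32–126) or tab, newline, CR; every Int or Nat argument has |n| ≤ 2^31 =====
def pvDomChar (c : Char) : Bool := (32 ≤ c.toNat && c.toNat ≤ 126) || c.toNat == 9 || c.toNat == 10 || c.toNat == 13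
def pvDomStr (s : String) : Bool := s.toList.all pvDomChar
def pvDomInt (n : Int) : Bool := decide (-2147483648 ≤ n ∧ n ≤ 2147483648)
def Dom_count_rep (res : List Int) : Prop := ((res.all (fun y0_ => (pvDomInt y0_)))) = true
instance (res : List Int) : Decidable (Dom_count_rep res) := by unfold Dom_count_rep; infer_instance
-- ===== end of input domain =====

-- B replaces A's per-element counter state machine with a two-pass run-length compression (same O(n) cost; objective: alternative structure).

-- ===== PORT A =====
def count_rep (res : List Int) : Int :=
  let s := (PySem.List.pyRange 0 ((res.length : Int) - 1) 1).foldl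
    (fun (s : Int × Int) j =>
      let aux : Int := if PySem.List.pyGetD res j 0 ≠ 0 then s.1 + 1 else 0
      let total : Int := if 2 ≤ aux ∧ PySem.List.pyGetD res (j + 1) 0 = 0 then s.2 + (aux - 1) else s.2
      (aux, total))
    ((0 : Int), (0 : Int))
  s.2

-- ===== PORT B =====
-- Source B's first loop body: extend the last run or open a new one.  The accumulator keeps
-- the runs in REVERSE order (head = python's runs[-1]) and is reversed afterwards,
-- so python's runs[:-1] is runs.reverse.dropLast.
def stepB (rs : List (Bool × Int)) (x : Int) : List (Bool × Int) :=
  let b := decide (x ≠ 0)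
  match rs with
  | (b', n) :: rest => if b' = b then (b', n + 1) :: rest else (b, 1) :: (b', n) :: rest
  | [] => [(b, 1)]

def count_rep_alt (res : List Int) : Int :=
  ((res.foldl stepB []).reverse.dropLast).foldl (fun t p => if p.1 then t + p.2 - 1 else t) 0

-- ===== PRECONDITION & SPEC =====
def Spec_count_rep (res : List Int) (out : Int) : Prop := out = count_rep_alt res
instance (res : List Int) (out : Int) : Decidable (Spec_count_rep res out) := by unfold Spec_count_rep; infer_instance

-- ===== CLAIM (what is proved, stated in full; the proofs are below) =====
def Claim_equal_count_rep : Prop := ∀ (res : List Int), Dom_count_rep res → Spec_count_rep res (count_rep res)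

-- ===== LEMMAS AND PROOFS =====

-- Reference semantics: goB a l = penalty A still collects over the rest l of the input
-- when the truthy-run length ending at the element just before l is a.
def goB (a : Int) : List Int → Int
  | [] => 0
  | y :: xs => (if 2 ≤ a ∧ y = 0 then a - 1 else 0) + goB (if y ≠ 0 then a + 1 else 0) xs

def goA (a : Int) : List Int → Int
  | [] => 0
  | x :: xs => goB (if x ≠ 0 then a + 1 else 0) xs

def gRun (p : Bool × Int) : Int := if p.1 then p.2 - 1 else 0

theorem foldl_gRun (rs : List (Bool × Int)) (c : Int) :
    rs.foldl (fun t p => if p.1 then t + p.2 - 1 else t) c = c + (rs.map gRun).sum := by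
  induction rs generalizing c with
  | nil => simp
  | cons p rs ih =>
    simp only [List.foldl_cons, List.map_cons, List.sum_cons, ih, gRun]
    split_ifs <;> ring

theorem key_B (l : List Int) (b : Bool) (n : Int) (rest : List (Bool × Int)) (hn : 1 ≤ n) :
    (((l.foldl stepB ((b, n) :: rest)).tail).map gRun).sum
      = (rest.map gRun).sum + goB (if b then n else 0) l := by
  induction l generalizing b n rest with
  | nil => simp [goB]
  | cons x xs ih =>
    by_cases hx : x = 0
    · cases b with
      | false =>
        have := ih false (n + 1) rest (by omega)
        simp only [List.foldl_cons, stepB, hx, goB]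
        simp at this ⊢
        omega
      | true =>
        have := ih false 1 ((true, n) :: rest) (by omega)
        simp only [List.foldl_cons, stepB, hx, goB]
        simp [gRun] at this ⊢
        rw [this]
        by_cases h2 : 2 ≤ n
        · simp [h2]; ring
        · have hn1 : n = 1 := by omega
          simp [hn1]
    · cases b with
      | true =>
        have := ih true (n + 1) rest (by omega)
        simp only [List.foldl_cons, stepB, hx, goB]
        simp [hx] at this ⊢
        omega
      | false =>
        have := ih true 1 ((false, n) :: rest) (by omega)
        simp only [List.foldl_cons, stepB, hx, goB]
        simp [hx, gRun] at this ⊢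
        omega

theorem alt_eq_goA (res : List Int) : count_rep_alt res = goA 0 res := by
  cases res with
  | nil => simp [count_rep_alt, goA]
  | cons x xs =>
    unfold count_rep_alt
    rw [foldl_gRun]
    have hdrop : ∀ (rs : List (Bool × Int)), rs.reverse.dropLast = rs.tail.reverse := by
      intro rs; cases rs with
      | nil => rfl
      | cons p ps => simp
    rw [hdrop, List.map_reverse, List.sum_reverse]
    simp only [List.foldl_cons]
    have hs : stepB [] x = [(decide (x ≠ 0), 1)] := rfl
    rw [hs, key_B xs (decide (x ≠ 0)) 1 [] (by omega)]
    by_cases hx : x = 0 <;> simp [goA, hx]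

theorem key_A (l : List Int) (aux total : Int) :
    ((PySem.List.pyRange 0 ((l.length : Int) - 1) 1).foldl
      (fun (s : Int × Int) j =>
        let a : Int := if PySem.List.pyGetD l j 0 ≠ 0 then s.1 + 1 else 0
        let t : Int := if 2 ≤ a ∧ PySem.List.pyGetD l (j + 1) 0 = 0 then s.2 + (a - 1) else s.2
        (a, t)) (aux, total)).2 = total + goA aux l := by
  induction l generalizing aux total with
  | nil =>
    rw [PySem.List.pyRange_one_eq_nil (by simp : ((([] : List Int)).length : Int) - 1 ≤ 0)]
    simp [goA]
  | cons x xs ih =>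
    cases xs with
    | nil =>
      rw [PySem.List.pyRange_one_eq_nil (by simp : (([x] : List Int).length : Int) - 1 ≤ 0)]
      simp [goA, goB]
    | cons y ys =>
      have hone : ((x :: y :: ys).length : Int) - 1 = ((y :: ys).length : Int) := by
        push_cast [List.length_cons]; ring
      rw [hone, PySem.List.pyRange_one_cons (by push_cast [List.length_cons]; omega)]
      simp only [List.foldl_cons]
      have g0 : PySem.List.pyGetD (x :: y :: ys) (0 : Int) 0 = x := by
        simp [pysem]
      have g1 : PySem.List.pyGetD (x :: y :: ys) ((0 : Int) + 1) 0 = y := by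
        norm_num [pysem]
      simp only [g0, g1]
      have hlen : (((y :: ys).length : Int) - 1).toNat = ys.length := by
        push_cast [List.length_cons]; omega
      have hr1 := PySem.List.pyRange_one 1 (((y :: ys).length : Int))
      rw [hlen] at hr1
      have hr0 := PySem.List.pyRange_one 0 ((((y :: ys).length : Int)) - 1)
      rw [Int.sub_zero, hlen] at hr0
      simp only [zero_add] at hr0
      have hbody : (fun (s : Int × Int) (k : Nat) =>
            (fun (s : Int × Int) j =>
              let a : Int := if PySem.List.pyGetD (x :: y :: ys) j 0 ≠ 0 then s.1 + 1 else 0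
              let t : Int := if 2 ≤ a ∧ PySem.List.pyGetD (x :: y :: ys) (j + 1) 0 = 0 then s.2 + (a - 1) else s.2
              (a, t)) s (1 + (k : Int)))
          = (fun (s : Int × Int) (k : Nat) =>
            (fun (s : Int × Int) j =>
              let a : Int := if PySem.List.pyGetD (y :: ys) j 0 ≠ 0 then s.1 + 1 else 0
              let t : Int := if 2 ≤ a ∧ PySem.List.pyGetD (y :: ys) (j + 1) 0 = 0 then s.2 + (a - 1) else s.2
              (a, t)) s ((k : Int))) := by
        funext s k
        beta_reduce
        have e2 : ((1 : Int) + (k : Int)) + 1 = ((k + 2 : Nat) : Int) := by push_cast; ring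
        have e1 : (1 : Int) + (k : Int) = ((k + 1 : Nat) : Int) := by push_cast; ring
        have e3 : ((k : Int)) + 1 = ((k + 1 : Nat) : Int) := by push_cast; ring
        rw [e2, e1, e3]
        simp only [PySem.List.pyGetD_natCast]
        simp
      have ihy := ih (if x ≠ 0 then aux + 1 else 0)
        (if 2 ≤ (if x ≠ 0 then aux + 1 else 0) ∧ y = 0 then total + ((if x ≠ 0 then aux + 1 else 0) - 1) else total)
      rw [hr0, List.foldl_map] at ihy
      rw [show ((0 : Int) + 1) = 1 from by norm_num, hr1, List.foldl_map, hbody, ihy]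
      simp only [goA, goB]
      split_ifs <;> ring

theorem count_rep_eq_goA (res : List Int) : count_rep res = goA 0 res := by
  have := key_A res 0 0
  simpa [count_rep] using this

-- ===== VERDICT (by name: the statement is the Claim_ definition above) =====
theorem count_rep_spec : Claim_equal_count_rep := by
  intro res _
  show count_rep res = count_rep_alt res
  rw [count_rep_eq_goA, alt_eq_goA]
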